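-- pv_equiv track=rewrite | github.com/rolansy/git-me-ai | backend/ai_agent.py | _infer_game_type
-- ===== SOURCE A (Python) =====
-- from typing import Dict, Tuple, List
--
-- def _infer_game_type(dependencies: List[str]) -> str:
--     if any('pygame' in dep.lower() for dep in dependencies):
--         return "Python-based"
--     elif any('unity' in dep.lower() for dep in dependencies):
--         return "Unity"
--     elif any('phaser' in dep.lower() for dep in dependencies):
--         return "web-based"
--     else:
--         return "interactive"
-- ===== SOURCE B (Python) =====
-- from typing import List
--
-- def _infer_game_type(dependencies: List[str]) -> str:
--     # single pass: lowercase each dependency once, collect three flags, then decide by priority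
--     has_pygame = has_unity = has_phaser = False
--     for dep in dependencies:
--         d = dep.lower()
--         if 'pygame' in d:
--             has_pygame = True
--         if 'unity' in d:
--             has_unity = True
--         if 'phaser' in d:
--             has_phaser = True
--     if has_pygame:
--         return "Python-based"
--     elif has_unity:
--         return "Unity"
--     elif has_phaser:
--         return "web-based"
--     else:
--         return "interactive"
-- ===== Notes on version B (the rewrite author's own statement) =====
-- stated objective: alternative
-- what changed: Replaces three separate any() scans (each re-lowercasing every dependency) with one single pass that lowercases each dependency once and accumulates three boolean flags, deciding the result by priority after the loop.
import Mathlib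
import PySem

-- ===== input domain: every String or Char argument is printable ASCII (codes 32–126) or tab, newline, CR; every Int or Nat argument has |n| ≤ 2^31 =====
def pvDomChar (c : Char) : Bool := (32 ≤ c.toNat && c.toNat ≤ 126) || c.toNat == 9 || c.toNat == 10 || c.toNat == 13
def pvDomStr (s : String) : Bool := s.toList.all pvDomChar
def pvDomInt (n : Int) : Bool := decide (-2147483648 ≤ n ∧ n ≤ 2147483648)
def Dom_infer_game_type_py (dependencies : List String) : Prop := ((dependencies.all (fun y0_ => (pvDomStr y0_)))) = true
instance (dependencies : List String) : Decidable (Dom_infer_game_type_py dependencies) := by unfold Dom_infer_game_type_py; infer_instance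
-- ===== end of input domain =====

-- B replaces A's three any() scans by one pass collecting three flags; same outputs ('alternative', not measured faster).

-- ===== PORT A =====
def infer_game_type_py (dependencies : List String) : String :=
  if dependencies.any (fun dep => PySem.Str.isIn "pygame" (PySem.Str.lower dep)) then
    "Python-based"
  else if dependencies.any (fun dep => PySem.Str.isIn "unity" (PySem.Str.lower dep)) then
    "Unity"
  else if dependencies.any (fun dep => PySem.Str.isIn "phaser" (PySem.Str.lower dep)) then
    "web-based"
  else
    "interactive"

-- ===== PORT B =====
def inferGameStep (f : Bool × Bool × Bool) (dep : String) : Bool × Bool × Bool :=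
  let d := PySem.Str.lower dep
  ((if PySem.Str.isIn "pygame" d then true else f.1),
   (if PySem.Str.isIn "unity" d then true else f.2.1),
   (if PySem.Str.isIn "phaser" d then true else f.2.2))

def infer_game_type_py_alt (dependencies : List String) : String :=
  let flags := dependencies.foldl inferGameStep (false, false, false)
  if flags.1 then "Python-based"
  else if flags.2.1 then "Unity"
  else if flags.2.2 then "web-based"
  else "interactive"

-- ===== PRECONDITION & SPEC =====
def Spec_infer_game_type_py (dependencies : List String) (out : String) : Prop := out = infer_game_type_py_alt dependencies
instance (dependencies : List String) (out : String) : Decidable (Spec_infer_game_type_py dependencies out) := by unfold Spec_infer_game_type_py; infer_instance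

-- ===== CLAIM (what is proved, stated in full; the proofs are below) =====
def Claim_equal_infer_game_type_py : Prop := ∀ (dependencies : List String), Dom_infer_game_type_py dependencies → Spec_infer_game_type_py dependencies (infer_game_type_py dependencies)

-- ===== LEMMAS AND PROOFS =====
theorem inferGameStep_foldl (l : List String) (f : Bool × Bool × Bool) :
    l.foldl inferGameStep f =
      (f.1 || l.any (fun dep => PySem.Str.isIn "pygame" (PySem.Str.lower dep)),
       f.2.1 || l.any (fun dep => PySem.Str.isIn "unity" (PySem.Str.lower dep)),
       f.2.2 || l.any (fun dep => PySem.Str.isIn "phaser" (PySem.Str.lower dep))) := by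
  induction l generalizing f with
  | nil => simp
  | cons x xs ih =>
      simp only [List.foldl_cons, ih, List.any_cons, inferGameStep]
      obtain ⟨a, b, c⟩ := f
      simp [Bool.or_assoc, Bool.or_comm]

-- ===== VERDICT (by name: the statement is the Claim_ definition above) =====
theorem infer_game_type_py_spec : Claim_equal_infer_game_type_py := by
  intro deps _
  unfold Spec_infer_game_type_py infer_game_type_py infer_game_type_py_alt
  rw [inferGameStep_foldl]
  simp
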